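-- pv_equiv track=rewrite | github.com/inz1981/AoC | 2015/01/01.py | move_to_basement
-- ===== SOURCE A (Python) =====
-- def move_to_basement(data):
--     curr_floor = 0
--     for idx, dir in enumerate(data):
--         if dir == "(":
--             curr_floor += 1
--         else:
--             curr_floor -= 1
--         if curr_floor == -1:
--             return idx + 1
-- ===== SOURCE B (Python) =====
-- def move_to_basement(data):
--     # Phase 1: build the full list of running floor values (prefix sums).
--     floors = []
--     t = 0
--     for c in data:
--         t += 1 if c == "(" else -1
--         floors.append(t)
--     # Phase 2: search that list for the first -1.
--     if -1 in floors:
--         return floors.index(-1) + 1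
-- ===== Notes on version B (the rewrite author's own statement) =====
-- stated objective: alternative
-- what changed: B splits A's inline branch-and-test loop into two phases: first build the whole list of running floor values (prefix sums), then search that list via a membership test plus list.index for the first -1 (1-based).
import Mathlib
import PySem

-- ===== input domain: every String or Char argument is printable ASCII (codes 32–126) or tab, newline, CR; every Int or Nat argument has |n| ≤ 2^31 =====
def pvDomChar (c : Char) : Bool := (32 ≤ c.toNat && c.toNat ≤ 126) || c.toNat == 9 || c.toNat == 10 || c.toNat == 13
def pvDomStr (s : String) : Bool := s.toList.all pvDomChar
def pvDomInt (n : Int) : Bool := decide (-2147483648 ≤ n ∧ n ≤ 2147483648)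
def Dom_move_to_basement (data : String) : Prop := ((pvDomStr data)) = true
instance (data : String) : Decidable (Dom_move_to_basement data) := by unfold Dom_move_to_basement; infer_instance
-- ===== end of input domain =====

-- B splits A's inline branch-and-test loop into two phases: build the list of running floors, then search it for -1 (alternative decomposition, same cost).


-- ===== PORT A =====
-- A's loop: carry curr_floor and idx, test for -1 after each step.
def pvLoopA : List Char → Int → Int → Option Int
  | [], _, _ => none
  | c :: rest, floor, idx =>
    let f := if c = '(' then floor + 1 else floor - 1
    if f = -1 then some (idx + 1) else pvLoopA rest f (idx + 1)

def move_to_basement (data : String) : Option Int := pvLoopA data.toList 0 0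

-- ===== PORT B =====
-- Phase 1 of Source B: build the list of running floor values.
def pvFloors : Int → List Char → List Int
  | _, [] => []
  | t, c :: cs =>
    let t' := t + (if c = '(' then 1 else -1)
    t' :: pvFloors t' cs

-- Phase 2 of Source B: 'if -1 in floors: return floors.index(-1) + 1'.
def move_to_basement_alt (data : String) : Option Int :=
  let floors := pvFloors 0 data.toList
  if (-1 : Int) ∈ floors then (PySem.List.index? floors (-1)).map (fun i => (i : Int) + 1)
  else none

-- ===== PRECONDITION & SPEC =====
def Spec_move_to_basement (data : String) (out : Option Int) : Prop := out = move_to_basement_alt data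
instance (data : String) (out : Option Int) : Decidable (Spec_move_to_basement data out) := by unfold Spec_move_to_basement; infer_instance

-- ===== CLAIM (what is proved, stated in full; the proofs are below) =====
def Claim_equal_move_to_basement : Prop := ∀ (data : String), Dom_move_to_basement data → Spec_move_to_basement data (move_to_basement data)

-- ===== LEMMAS AND PROOFS =====
theorem pvLoopA_eq_index (l : List Char) (f idx : Int) :
    pvLoopA l f idx =
      (PySem.List.index? (pvFloors f l) (-1)).map (fun i => idx + 1 + (i : Int)) := by
  induction l generalizing f idx with
  | nil => simp [pvLoopA, pvFloors, PySem.List.index?]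
  | cons c cs ih =>
    have hstep : (if c = '(' then f + 1 else f - 1) = f + (if c = '(' then 1 else -1) := by
      split <;> ring
    simp only [pvLoopA, pvFloors, hstep]
    by_cases h : f + (if c = '(' then (1 : Int) else -1) = -1
    · rw [if_pos h, h, PySem.List.index?_cons_self]
      simp
    · rw [if_neg h, PySem.List.index?_cons_of_ne _ h, ih]
      cases PySem.List.index? (pvFloors (f + (if c = '(' then 1 else -1)) cs) (-1) with
      | none => simp
      | some k => simp; ring

theorem move_to_basement_spec : Claim_equal_move_to_basement := by
  intro data _
  unfold Spec_move_to_basement move_to_basement move_to_basement_alt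
  rw [pvLoopA_eq_index]
  by_cases h : (-1 : Int) ∈ pvFloors 0 data.toList
  · rw [if_pos h]
    cases hk : PySem.List.index? (pvFloors 0 data.toList) (-1) with
    | none =>
      exact absurd ((PySem.List.index?_eq_none_iff _ _).mp hk) (not_not_intro h)
    | some k => simp; ring
  · rw [if_neg h, (PySem.List.index?_eq_none_iff _ _).mpr h]
    simp
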